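-- pv_equiv track=rewrite | github.com/aakashverma1124/HackWithInfy-Problems | Python/MaxFunds.py | max_funds
-- ===== SOURCE A (Python) =====
-- def dfs(temp, node, visited, graph):
--     temp.append(node)
--     visited[node] = True
--     for neighbour in graph[node]:
--         if visited[neighbour] is not True:
--             temp = dfs(temp, neighbour, visited, graph)
--
--     return temp
--
-- def max_funds(n, arr, p, pairs):
--     graph = dict()
--     for i in range(1, n + 1):
--         graph[i] = list()
--     for pair in pairs:
--         graph[pair[0]].append(pair[1])
--         graph[pair[1]].append(pair[0])
--
--     visited = [False] * (n + 1)
--     components = []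
--
--     for v in range(1, n + 1):
--         if len(graph[v]) > 0 and visited[v] is not True:
--             temp = []
--             components.append(dfs(temp, v, visited, graph))
--         elif (len(graph[v]) == 0):
--             components.append([v])
--
--     max_fund = 0
--     for component in components:
--         total = 0
--         for i in component:
--             total += arr[i - 1]
--         max_fund = max(max_fund, total)
--     return max_fund
-- ===== SOURCE B (Python) =====
-- def max_funds(n, arr, p, pairs):
--     # merge-smaller-into-larger component labelling (no graph, no recursion)
--     label = list(range(n + 1))
--     members = {v: [v] for v in range(1, n + 1)}
--     for a, b in pairs:
--         la, lb = label[a], label[b]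
--         if la != lb:
--             if len(members[la]) < len(members[lb]):
--                 la, lb = lb, la
--             for v in members[lb]:
--                 label[v] = la
--             members[la].extend(members[lb])
--             del members[lb]
--     best = 0
--     for comp in members.values():
--         s = sum(arr[v - 1] for v in comp)
--         if s > best:
--             best = s
--     return best
-- ===== Notes on version B (the rewrite author's own statement) =====
-- stated objective: alternative
-- what changed: Replaces the adjacency-list + recursive DFS component search by a merge-smaller-into-larger component-labelling scheme (a list-based union of classes driven directly by the pair list), with the 0-floored maximum of per-component sums computed from the resulting label classes.
import Mathlib
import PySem

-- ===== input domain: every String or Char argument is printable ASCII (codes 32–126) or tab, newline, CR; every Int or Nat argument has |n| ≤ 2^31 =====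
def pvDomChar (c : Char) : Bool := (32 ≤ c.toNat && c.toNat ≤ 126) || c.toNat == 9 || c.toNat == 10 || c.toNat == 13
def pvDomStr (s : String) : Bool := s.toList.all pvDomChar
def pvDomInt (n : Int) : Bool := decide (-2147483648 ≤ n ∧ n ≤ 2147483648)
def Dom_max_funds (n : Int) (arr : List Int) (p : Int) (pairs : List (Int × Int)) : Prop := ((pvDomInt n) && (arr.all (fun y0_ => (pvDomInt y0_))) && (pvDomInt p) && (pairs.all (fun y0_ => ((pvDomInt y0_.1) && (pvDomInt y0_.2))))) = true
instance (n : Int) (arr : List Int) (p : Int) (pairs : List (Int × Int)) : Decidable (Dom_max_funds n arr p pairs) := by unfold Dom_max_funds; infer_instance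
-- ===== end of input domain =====

-- B replaces the adjacency-list + recursive DFS by merge-smaller-into-larger component
-- labelling (no graph, no recursion); equal return value on Pre_ is proved below.

-- ===== PORT A =====
def dfsA (graph : PySem.Dict Int (List Int)) : Nat → List Int → Int → List Bool → List Int × List Bool
  | 0, temp, _, visited => (temp, visited)
  | fuel+1, temp, node, visited =>
    (graph.getD node []).foldl
      (fun st neighbour =>
        if PySem.List.pyGetD st.2 neighbour true ≠ true then
          dfsA graph fuel st.1 neighbour st.2
        else st)
      (temp ++ [node], PySem.List.pySetD visited node true)

def max_funds (n : Int) (arr : List Int) (p : Int) (pairs : List (Int × Int)) : Int :=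
  let graph : PySem.Dict Int (List Int) :=
    (PySem.List.pyRange 1 (n+1) 1).foldl (fun g i => g.insert i []) PySem.Dict.empty
  let graph := pairs.foldl
    (fun g pr => (g.modify pr.1 [] (· ++ [pr.2])).modify pr.2 [] (· ++ [pr.1])) graph
  let st := (PySem.List.pyRange 1 (n+1) 1).foldl
    (fun (st : List (List Int) × List Bool) v =>
      if 0 < (graph.getD v []).length ∧ PySem.List.pyGetD st.2 v true ≠ true then
        let r := dfsA graph (n.toNat + 2) [] v st.2
        (st.1 ++ [r.1], r.2)
      else if (graph.getD v []).length = 0 then (st.1 ++ [[v]], st.2)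
      else st)
    ([], List.replicate (n + 1).toNat false)
  st.1.foldl (fun m c => max m (c.foldl (fun t i => t + PySem.List.pyGetD arr (i - 1) 0) 0)) 0

-- ===== PORT B =====
def max_funds_alt (n : Int) (arr : List Int) (p : Int) (pairs : List (Int × Int)) : Int :=
  let st := pairs.foldl
    (fun (st : List Int × PySem.Dict Int (List Int)) pr =>
      let la := PySem.List.pyGetD st.1 pr.1 0
      let lb := PySem.List.pyGetD st.1 pr.2 0
      if la ≠ lb then
        let kk := if (st.2.getD la []).length < (st.2.getD lb []).length then (lb, la) else (la, lb)
        let label := (st.2.getD kk.2 []).foldl (fun l v => PySem.List.pySetD l v kk.1) st.1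
        let members := (st.2.insert kk.1 (st.2.getD kk.1 [] ++ st.2.getD kk.2 [])).erase kk.2
        (label, members)
      else st)
    (PySem.List.pyRange 0 (n+1) 1,
     (PySem.List.pyRange 1 (n+1) 1).foldl (fun d v => d.insert v [v]) PySem.Dict.empty)
  st.2.values.foldl
    (fun best comp =>
      let s := (comp.map (fun v => PySem.List.pyGetD arr (v - 1) 0)).sum
      if best < s then s else best) 0

-- ===== PRECONDITION & SPEC =====
-- Pre_ excludes exactly the inputs where Python A raises: n < 0 never happens to raise but the
-- graph/visited/arr indexing raises (KeyError/IndexError) unless every pair endpoint lies in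
-- 1..n and arr has at least n entries.
def Pre_max_funds (n : Int) (arr : List Int) (p : Int) (pairs : List (Int × Int)) : Prop :=
  (0 < n → n ≤ arr.length) ∧ ∀ pr ∈ pairs, 1 ≤ pr.1 ∧ pr.1 ≤ n ∧ 1 ≤ pr.2 ∧ pr.2 ≤ n
instance (n : Int) (arr : List Int) (p : Int) (pairs : List (Int × Int)) : Decidable (Pre_max_funds n arr p pairs) := by unfold Pre_max_funds; infer_instance
def pvWitness_max_funds : Int × List Int × Int × (List (Int × Int)) := (3, ([5, -2, 7], (1, [(1, 2)])))

def Spec_max_funds (n : Int) (arr : List Int) (p : Int) (pairs : List (Int × Int)) (out : Int) : Prop := out = max_funds_alt n arr p pairs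
instance (n : Int) (arr : List Int) (p : Int) (pairs : List (Int × Int)) (out : Int) : Decidable (Spec_max_funds n arr p pairs out) := by unfold Spec_max_funds; infer_instance

-- ===== CLAIM (what is proved, stated in full; the proofs are below) =====
def Claim_equal_max_funds : Prop := ∀ (n : Int) (arr : List Int) (p : Int) (pairs : List (Int × Int)), Dom_max_funds n arr p pairs → Pre_max_funds n arr p pairs → Spec_max_funds n arr p pairs (max_funds n arr p pairs)

-- ===== LEMMAS AND PROOFS =====

-- the common vocabulary: node range, edge relation, connectivity, weights
def rng (n : Int) : List Int := PySem.List.pyRange 1 (n+1) 1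
def adjP (pairs : List (Int × Int)) (x y : Int) : Prop := (x, y) ∈ pairs ∨ (y, x) ∈ pairs
def connP (pairs : List (Int × Int)) (x y : Int) : Prop := Relation.ReflTransGen (adjP pairs) x y
def wt (arr : List Int) (x : Int) : Int := PySem.List.pyGetD arr (x - 1) 0
def sumW (arr : List Int) (c : List Int) : Int := (c.map (wt arr)).sum

-- a list of lists is "the components of 1..n": a partition of 1..n into connectivity classes
def IsCompList (n : Int) (pairs : List (Int × Int)) (ls : List (List Int)) : Prop :=
  ls.flatten.Perm (rng n) ∧
  (∀ l ∈ ls, ∀ u ∈ l, ∀ v ∈ l, connP pairs u v) ∧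
  (∀ l ∈ ls, ∀ u ∈ l, ∀ v ∈ rng n, connP pairs u v → v ∈ l)

lemma mem_rng {n x : Int} : x ∈ rng n ↔ 1 ≤ x ∧ x < n + 1 := PySem.List.mem_pyRange_one

lemma nodup_rng (n : Int) : (rng n).Nodup := by
  unfold rng
  rw [PySem.List.pyRange_of_pos 1 (n+1) (by norm_num)]
  refine (List.nodup_range).map ?_
  intro a b h
  simp only at h
  omega

lemma connP_symm {pairs : List (Int × Int)} {x y : Int} (h : connP pairs x y) : connP pairs y x :=
  Relation.ReflTransGen.symmetric (fun _ _ hadj => Or.symm hadj) h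

lemma connP_mono {ps : List (Int × Int)} (qs : List (Int × Int)) {x y : Int}
    (h : connP ps x y) : connP (ps ++ qs) x y := by
  refine Relation.ReflTransGen.mono ?_ h
  intro a b hab
  rcases hab with h | h
  · exact Or.inl (List.mem_append_left _ h)
  · exact Or.inr (List.mem_append_left _ h)

lemma adjP_rng {n : Int} {pairs : List (Int × Int)}
    (hpre : ∀ pr ∈ pairs, 1 ≤ pr.1 ∧ pr.1 ≤ n ∧ 1 ≤ pr.2 ∧ pr.2 ≤ n)
    {x y : Int} (h : adjP pairs x y) : x ∈ rng n ∧ y ∈ rng n := by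
  rcases h with h | h <;> obtain ⟨h1, h2, h3, h4⟩ := hpre _ h <;>
    simp only [rng, PySem.List.mem_pyRange_one] <;> omega


-- label-function lemma: connectivity implies equal labels when every edge has equal labels
lemma connP_label (f : Int → Int) {ps : List (Int × Int)}
    (hf : ∀ pr ∈ ps, f pr.1 = f pr.2) {x y : Int} (h : connP ps x y) : f x = f y := by
  induction h with
  | refl => rfl
  | tail _ hadj ih =>
    rcases hadj with h' | h'
    · exact ih.trans (hf _ h')
    · exact ih.trans (hf _ h').symm

-- ----- the final fold over component sums depends only on IsCompList -----

lemma foldl_max_cases (xs : List Int) (a : Int) :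
    xs.foldl max a = a ∨ xs.foldl max a ∈ xs := by
  induction xs generalizing a with
  | nil => exact Or.inl rfl
  | cons x xs ih =>
    rcases ih (max a x) with h | h
    · rcases max_cases a x with ⟨he, _⟩ | ⟨he, _⟩
      · exact Or.inl (by simp only [List.foldl_cons]; rw [h, he])
      · refine Or.inr ?_
        simp only [List.foldl_cons]
        rw [h, he]
        exact List.mem_cons_self
    · exact Or.inr (List.mem_cons_of_mem _ h)

lemma isCompList_flatten_nodup {n : Int} {pairs : List (Int × Int)} {ls : List (List Int)}
    (h : IsCompList n pairs ls) : ls.flatten.Nodup :=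
  h.1.symm.nodup (nodup_rng n)

lemma isCompList_nodup_mem {n : Int} {pairs : List (Int × Int)} {ls : List (List Int)}
    (h : IsCompList n pairs ls) {c : List Int} (hc : c ∈ ls) : c.Nodup :=
  (List.sublist_flatten_of_mem hc).nodup (isCompList_flatten_nodup h)

lemma isCompList_fold_le {n : Int} {pairs : List (Int × Int)} {ls1 ls2 : List (List Int)}
    (arr : List Int) (h1 : IsCompList n pairs ls1) (h2 : IsCompList n pairs ls2) :
    ls1.foldl (fun m c => max m (sumW arr c)) 0 ≤ ls2.foldl (fun m c => max m (sumW arr c)) 0 := by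
  rw [show ls1.foldl (fun m c => max m (sumW arr c)) 0 = (ls1.map (sumW arr)).foldl max 0 by
        rw [List.foldl_map]]
  rw [show ls2.foldl (fun m c => max m (sumW arr c)) 0 = (ls2.map (sumW arr)).foldl max 0 by
        rw [List.foldl_map]]
  have hb2 := PySem.List.le_foldl_max (ls2.map (sumW arr)) 0
  rcases foldl_max_cases (ls1.map (sumW arr)) 0 with h | h
  · rw [h]; exact hb2.1
  · obtain ⟨c, hc, hceq⟩ := List.mem_map.1 h
    rw [← hceq]
    cases c with
    | nil => simpa [sumW] using hb2.1
    | cons u c' =>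
      have hu : u ∈ u :: c' := List.mem_cons_self
      have hu1 : u ∈ ls1.flatten := List.mem_flatten.2 ⟨_, hc, hu⟩
      have hur : u ∈ rng n := h1.1.mem_iff.1 hu1
      have hu2 : u ∈ ls2.flatten := h2.1.mem_iff.2 hur
      obtain ⟨c2, hc2, hu2'⟩ := List.mem_flatten.1 hu2
      have hmemiff : ∀ x, x ∈ u :: c' ↔ x ∈ c2 := by
        intro x
        constructor
        · intro hx
          have hconn : connP pairs u x := h1.2.1 _ hc u hu x hx
          have hxr : x ∈ rng n := h1.1.mem_iff.1 (List.mem_flatten.2 ⟨_, hc, hx⟩)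
          exact h2.2.2 _ hc2 u hu2' x hxr hconn
        · intro hx
          have hconn : connP pairs u x := h2.2.1 _ hc2 u hu2' x hx
          have hxr : x ∈ rng n := h2.1.mem_iff.1 (List.mem_flatten.2 ⟨_, hc2, hx⟩)
          exact h1.2.2 _ hc u hu x hxr hconn
      have hperm : (u :: c').Perm c2 :=
        (List.perm_ext_iff_of_nodup (isCompList_nodup_mem h1 hc)
          (isCompList_nodup_mem h2 hc2)).2 hmemiff
      have hsum : sumW arr (u :: c') = sumW arr c2 := (hperm.map (wt arr)).sum_eq
      rw [hsum]
      exact hb2.2 _ (List.mem_map.2 ⟨c2, hc2, rfl⟩)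

lemma isCompList_fold_eq {n : Int} {pairs : List (Int × Int)} {ls1 ls2 : List (List Int)}
    (arr : List Int) (h1 : IsCompList n pairs ls1) (h2 : IsCompList n pairs ls2) :
    ls1.foldl (fun m c => max m (sumW arr c)) 0 = ls2.foldl (fun m c => max m (sumW arr c)) 0 :=
  le_antisymm (isCompList_fold_le arr h1 h2) (isCompList_fold_le arr h2 h1)

-- ----- small pySetD / pyGetD / count facts -----

lemma pySetD_eq_set {α : Type} (xs : List α) (i : Int) (v : α)
    (h0 : 0 ≤ i) (h1 : i < xs.length) : PySem.List.pySetD xs i v = xs.set i.toNat v := by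
  simp only [PySem.List.pySetD, PySem.List.pySet?, PySem.List.pyIdx?, if_pos h0, if_pos h1,
    Option.map_some, Option.getD_some]

lemma pySetD_length {α : Type} (xs : List α) (i : Int) (v : α) :
    (PySem.List.pySetD xs i v).length = xs.length := by
  simp only [PySem.List.pySetD, PySem.List.pySet?]
  cases PySem.List.pyIdx? xs.length i <;> simp

lemma pyGetD_set {α : Type} (xs : List α) (i x : Int) (v d : α)
    (hi0 : 0 ≤ i) (hi1 : i < xs.length) (hx0 : 0 ≤ x) (hx1 : x < xs.length) :
    PySem.List.pyGetD (xs.set i.toNat v) x d = if x = i then v else PySem.List.pyGetD xs x d := by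
  rw [PySem.List.pyGetD_eq_getElem _ d hx0 (by simpa using hx1),
    PySem.List.pyGetD_eq_getElem _ d hx0 hx1]
  rw [List.getElem_set]
  have : i.toNat = x.toNat ↔ x = i := by omega
  simp [this]

lemma count_false_set (l : List Bool) (k : Nat) (hk : k < l.length) (hf : l[k] = false) :
    (l.set k true).count false + 1 = l.count false := by
  induction l generalizing k with
  | nil => simp at hk
  | cons b l ih =>
    cases k with
    | zero => simp at hf; subst hf; simp [List.count_cons]
    | succ k =>
      simp only [List.length_cons] at hk
      simp only [List.getElem_cons_succ] at hf
      have := ih k (by omega) hf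
      simp only [List.set_cons_succ, List.count_cons]
      omega

-- marked predicate of A's visited list
def Mk (visited : List Bool) (x : Int) : Prop := PySem.List.pyGetD visited x true = true

-- ===================== side A =====================

def Agraph (n : Int) (pairs : List (Int × Int)) : PySem.Dict Int (List Int) :=
  pairs.foldl (fun g pr => (g.modify pr.1 [] (· ++ [pr.2])).modify pr.2 [] (· ++ [pr.1]))
    ((rng n).foldl (fun g i => g.insert i []) PySem.Dict.empty)

lemma Agraph_base (n : Int) :
    ∀ (l : List Int) (g : PySem.Dict Int (List Int)), (∀ x, g.getD x [] = []) →
      ∀ x, (l.foldl (fun g i => g.insert i []) g).getD x ([] : List Int) = [] := by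
  intro l
  induction l with
  | nil => intro g hg x; exact hg x
  | cons i l ih =>
    intro g hg x
    refine ih _ ?_ x
    intro z
    rw [PySem.Dict.getD_insert]
    split_ifs <;> simp [hg]

lemma Agraph_fold (ps : List (Int × Int)) :
    ∀ (g : PySem.Dict Int (List Int)) (x y : Int),
      y ∈ (ps.foldl (fun g pr => (g.modify pr.1 [] (· ++ [pr.2])).modify pr.2 [] (· ++ [pr.1])) g).getD x []
      ↔ y ∈ g.getD x [] ∨ (x, y) ∈ ps ∨ (y, x) ∈ ps := by
  induction ps with
  | nil => intro g x y; simp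
  | cons pr ps ih =>
    intro g x y
    rw [List.foldl_cons, ih]
    have hstep : ∀ z, z ∈ ((g.modify pr.1 [] (· ++ [pr.2])).modify pr.2 [] (· ++ [pr.1])).getD x []
        ↔ z ∈ g.getD x [] ∨ (x = pr.1 ∧ z = pr.2) ∨ (x = pr.2 ∧ z = pr.1) := by
      intro z
      obtain ⟨a, b⟩ := pr
      simp only
      by_cases hab : b = a
      · subst hab
        by_cases hxa : x = b <;>
          simp [PySem.Dict.getD_modify, hxa, List.mem_append] <;> tauto
      · have hab2 : ¬ a = b := fun h => hab h.symm
        by_cases hxb : x = b <;> by_cases hxa : x = a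
        · exact absurd (hxa ▸ hxb) (fun h => hab h.symm)
        · subst hxb
          simp [PySem.Dict.getD_modify, hab, hab2, List.mem_append]
        · subst hxa
          simp [PySem.Dict.getD_modify, hab, hab2, List.mem_append]
        · simp [PySem.Dict.getD_modify, hxa, hxb]
    rw [hstep]
    have h1 : (x, y) ∈ pr :: ps ↔ (x = pr.1 ∧ y = pr.2) ∨ (x, y) ∈ ps := by
      constructor
      · intro h; rcases List.mem_cons.1 h with h | h
        · left; exact ⟨congrArg Prod.fst h, congrArg Prod.snd h⟩
        · right; exact h
      · rintro (⟨h1, h2⟩ | h)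
        · exact List.mem_cons.2 (Or.inl (by cases pr; simp_all))
        · exact List.mem_cons.2 (Or.inr h)
    have h2 : (y, x) ∈ pr :: ps ↔ (x = pr.2 ∧ y = pr.1) ∨ (y, x) ∈ ps := by
      constructor
      · intro h; rcases List.mem_cons.1 h with h | h
        · left; exact ⟨congrArg Prod.snd h, congrArg Prod.fst h⟩
        · right; exact h
      · rintro (⟨h1, h2⟩ | h)
        · exact List.mem_cons.2 (Or.inl (by cases pr; simp_all))
        · exact List.mem_cons.2 (Or.inr h)
    rw [h1, h2]
    tauto

lemma Agraph_mem (n : Int) (pairs : List (Int × Int)) (x y : Int) :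
    y ∈ (Agraph n pairs).getD x [] ↔ adjP pairs x y := by
  unfold Agraph adjP
  rw [Agraph_fold]
  rw [Agraph_base n _ _ (fun _ => PySem.Dict.getD_empty _ _)]
  simp

lemma edgeless_class {n : Int} {pairs : List (Int × Int)} {x y : Int}
    (hx : (Agraph n pairs).getD x [] = []) (h : connP pairs x y) : y = x := by
  rcases Relation.ReflTransGen.cases_head h with h' | ⟨c, hac, _⟩
  · exact h'.symm
  · exact absurd ((Agraph_mem n pairs x c).2 hac) (by simp [hx])

def AStep (g : PySem.Dict Int (List Int)) (n : Int) :
    (List (List Int) × List Bool) → Int → List (List Int) × List Bool := fun st v =>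
  if 0 < (g.getD v []).length ∧ PySem.List.pyGetD st.2 v true ≠ true then
    let r := dfsA g (n.toNat + 2) [] v st.2
    (st.1 ++ [r.1], r.2)
  else if (g.getD v []).length = 0 then (st.1 ++ [[v]], st.2)
  else st

def ASt (n : Int) (pairs : List (Int × Int)) : List (List Int) × List Bool :=
  (rng n).foldl (AStep (Agraph n pairs) n) ([], List.replicate (n + 1).toNat false)

lemma foldl_max_congr (S1 S2 : List Int → Int) (h : ∀ c, S1 c = S2 c) :
    ∀ (ls : List (List Int)) (a : Int),
      ls.foldl (fun m c => max m (S1 c)) a = ls.foldl (fun m c => max m (S2 c)) a := by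
  intro ls
  induction ls with
  | nil => intro a; rfl
  | cons c ls ih => intro a; simp only [List.foldl_cons, h, ih]

lemma max_funds_eq (n : Int) (arr : List Int) (p : Int) (pairs : List (Int × Int)) :
    max_funds n arr p pairs = (ASt n pairs).1.foldl (fun m c => max m (sumW arr c)) 0 := by
  have h : max_funds n arr p pairs =
      (ASt n pairs).1.foldl
        (fun m c => max m (c.foldl (fun t i => t + PySem.List.pyGetD arr (i - 1) 0) 0)) 0 := rfl
  rw [h]
  exact foldl_max_congr _ _ (fun c => by rw [PySem.List.foldl_add, zero_add]; rfl) _ 0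

-- the dfs specification
lemma dfs_spec {n : Int} {pairs : List (Int × Int)} (g : PySem.Dict Int (List Int))
    (hg : ∀ x y, y ∈ g.getD x [] ↔ adjP pairs x y)
    (hpre : ∀ pr ∈ pairs, 1 ≤ pr.1 ∧ pr.1 ≤ n ∧ 1 ≤ pr.2 ∧ pr.2 ≤ n)
    (hn : 0 ≤ n) :
    ∀ (fuel : Nat) (visited : List Bool) (node : Int) (temp : List Int),
    visited.count false < fuel →
    visited.length = (n + 1).toNat →
    node ∈ rng n → ¬ Mk visited node →
    ∃ newl visited', dfsA g fuel temp node visited = (temp ++ newl, visited') ∧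
      visited'.length = (n + 1).toNat ∧
      (∀ x ∈ rng n, (Mk visited' x ↔ Mk visited x ∨ x ∈ newl)) ∧
      newl.Nodup ∧
      (∀ x ∈ newl, x ∈ rng n ∧ ¬ Mk visited x ∧ connP pairs x node) ∧
      node ∈ newl ∧
      (∀ x ∈ newl, ∀ y ∈ g.getD x [], Mk visited' y) ∧
      visited'.count false + newl.length ≤ visited.count false := by
  intro fuel
  induction fuel with
  | zero => intro visited node temp hcnt _ _ _; omega
  | succ fuel ih =>
    intro visited node temp hcnt hlen hnode hnm
    have hnb := mem_rng.1 hnode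
    have hlenZ : (visited.length : Int) = n + 1 := by rw [hlen]; omega
    have hn0 : (0:Int) ≤ node := by omega
    have hn1 : (node:Int) < visited.length := by omega
    have hset : PySem.List.pySetD visited node true = visited.set node.toNat true :=
      pySetD_eq_set visited node true hn0 hn1
    have hgetf : visited[node.toNat]'(by omega) = false := by
      have h1 : PySem.List.pyGetD visited node true = visited[node.toNat]'(by omega) :=
        PySem.List.pyGetD_eq_getElem visited true hn0 hn1
      rcases Bool.eq_false_or_eq_true (visited[node.toNat]'(by omega)) with h | h
      · exact absurd (show Mk visited node from h1.trans h) hnm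
      · exact h
    have hcnt1 : (visited.set node.toNat true).count false + 1 = visited.count false :=
      count_false_set visited node.toNat (by omega) hgetf
    -- the inner fold invariant
    have fold_spec : ∀ (ns : List Int), (∀ y ∈ ns, y ∈ g.getD node []) →
        ∀ (acc : List Int) (V : List Bool),
        V.length = (n + 1).toNat →
        (∀ x ∈ rng n, (Mk V x ↔ Mk visited x ∨ x ∈ acc)) →
        acc.Nodup →
        (∀ x ∈ acc, x ∈ rng n ∧ ¬ Mk visited x ∧ connP pairs x node) →
        node ∈ acc →
        (∀ x ∈ acc, x ≠ node → ∀ y ∈ g.getD x [], Mk V y) →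
        V.count false + acc.length ≤ visited.count false →
        ∃ ext V',
          ns.foldl (fun st neighbour =>
              if PySem.List.pyGetD st.2 neighbour true ≠ true then dfsA g fuel st.1 neighbour st.2
              else st) (temp ++ acc, V) = (temp ++ (acc ++ ext), V') ∧
          V'.length = (n + 1).toNat ∧
          (∀ x ∈ rng n, (Mk V' x ↔ Mk visited x ∨ x ∈ acc ++ ext)) ∧
          (acc ++ ext).Nodup ∧
          (∀ x ∈ acc ++ ext, x ∈ rng n ∧ ¬ Mk visited x ∧ connP pairs x node) ∧
          (∀ x ∈ acc ++ ext, x ≠ node → ∀ y ∈ g.getD x [], Mk V' y) ∧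
          V'.count false + (acc ++ ext).length ≤ visited.count false ∧
          (∀ y ∈ ns, Mk V' y) := by
      intro ns
      induction ns with
      | nil =>
        intro _ acc V hVlen hmk hnd hprops hnodeacc hdone hcount
        exact ⟨[], V, by simp, hVlen, by simpa using hmk, by simpa using hnd,
          by simpa using hprops, by simpa using hdone, by simpa using hcount, by simp⟩
      | cons y ns ihn =>
        intro hns acc V hVlen hmk hnd hprops hnodeacc hdone hcount
        have hy : y ∈ g.getD node [] := hns y List.mem_cons_self
        have hyadj : adjP pairs node y := (hg node y).1 hy
        have hyrng : y ∈ rng n := (adjP_rng hpre hyadj).2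
        have hmono : ∀ (W W' : List Bool) (exts : List Int),
            (∀ x ∈ rng n, (Mk W x ↔ Mk visited x ∨ x ∈ exts)) →
            (∀ x ∈ rng n, (Mk W' x ↔ Mk visited x ∨ x ∈ exts ∨ x ∈ rng n ∧ False)) → True := fun _ _ _ _ _ => trivial
        by_cases hMkV : Mk V y
        · have hcond : ¬ (PySem.List.pyGetD V y true ≠ true) := by
            intro hc; exact hc hMkV
          rw [List.foldl_cons, if_neg hcond]
          obtain ⟨ext, V', heq, hV'len, hmk', hnd', hprops', hdone', hcount', hmarked⟩ :=
            ihn (fun z hz => hns z (List.mem_cons_of_mem _ hz)) acc V hVlen hmk hnd hprops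
              hnodeacc hdone hcount
          refine ⟨ext, V', heq, hV'len, hmk', hnd', hprops', hdone', hcount', ?_⟩
          intro z hz
          rcases List.mem_cons.1 hz with rfl | hz'
          · -- y was already marked in V; stays marked
            have h1 := (hmk z hyrng).1 hMkV
            exact (hmk' z hyrng).2 (h1.imp id (fun hz2 => List.mem_append_left _ hz2))
          · exact hmarked z hz'
        · have hcond : PySem.List.pyGetD V y true ≠ true := hMkV
          rw [List.foldl_cons, if_pos hcond]
          have hacc1 : 1 ≤ acc.length := List.length_pos_of_mem hnodeacc
          have hVcnt : V.count false < fuel := by omega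
          obtain ⟨newl, V2, heq2, hV2len, hmk2, hnd2, hprops2, hyin2, hdone2, hcnt2⟩ :=
            ih V y (temp ++ acc) hVcnt hVlen hyrng hMkV
          rw [heq2]
          have hsub : ∀ x ∈ acc, Mk V x := by
            intro x hx
            exact (hmk x (hprops x hx).1).2 (Or.inr hx)
          have hmkA : ∀ x ∈ rng n, (Mk V2 x ↔ Mk visited x ∨ x ∈ acc ++ newl) := by
            intro x hx
            rw [hmk2 x hx, hmk x hx, List.mem_append]
            tauto
          have hndA : (acc ++ newl).Nodup := by
            refine (List.nodup_append).2 ⟨hnd, hnd2, ?_⟩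
            intro x hx1 z hz2 hxz
            exact (hprops2 z hz2).2.1 (hxz ▸ hsub x hx1)
          have hpropsA : ∀ x ∈ acc ++ newl, x ∈ rng n ∧ ¬ Mk visited x ∧ connP pairs x node := by
            intro x hx
            rcases List.mem_append.1 hx with hx' | hx'
            · exact hprops x hx'
            · obtain ⟨hxr, hxnm, hxc⟩ := hprops2 x hx'
              refine ⟨hxr, fun hc => hxnm ((hmk x hxr).2 (Or.inl hc)), ?_⟩
              exact hxc.trans (Relation.ReflTransGen.single (Or.symm hyadj))
          have hnodeA : node ∈ acc ++ newl := List.mem_append_left _ hnodeacc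
          have hdoneA : ∀ x ∈ acc ++ newl, x ≠ node → ∀ z ∈ g.getD x [], Mk V2 z := by
            intro x hx hxn z hz
            have hzr : z ∈ rng n := (adjP_rng hpre ((hg x z).1 hz)).2
            rcases List.mem_append.1 hx with hx' | hx'
            · exact (hmk2 z hzr).2 (Or.inl (hdone x hx' hxn z hz))
            · exact hdone2 x hx' z hz
          have hcountA : V2.count false + (acc ++ newl).length ≤ visited.count false := by
            rw [List.length_append]
            omega
          obtain ⟨ext', V', heq', hV'len, hmk', hnd', hprops', hdone', hcount', hmarked⟩ :=
            ihn (fun z hz => hns z (List.mem_cons_of_mem _ hz)) (acc ++ newl) V2 hV2len hmkA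
              hndA hpropsA hnodeA hdoneA hcountA
          refine ⟨newl ++ ext', V', ?_, hV'len, ?_, ?_, ?_, ?_, ?_, ?_⟩
          · rw [show temp ++ acc ++ newl = temp ++ (acc ++ newl) from List.append_assoc temp acc newl,
              heq']
            simp [List.append_assoc]
          · intro x hx; rw [hmk' x hx]; simp [List.append_assoc]
          · simpa [List.append_assoc] using hnd'
          · intro x hx; exact hprops' x (by simpa [List.append_assoc] using hx)
          · intro x hx; exact hdone' x (by simpa [List.append_assoc] using hx)
          · simpa [List.append_assoc] using hcount'
          · intro z hz
            rcases List.mem_cons.1 hz with rfl | hz'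
            · have h1 : Mk V2 z := (hmk2 z hyrng).2 (Or.inr hyin2)
              have h2 := (hmkA z hyrng).1 h1
              exact (hmk' z hyrng).2 (h2.imp id (fun hz2 => List.mem_append_left _ hz2))
            · exact hmarked z hz'
    -- apply the fold invariant to the initial state
    have hmk1 : ∀ x ∈ rng n, (Mk (PySem.List.pySetD visited node true) x ↔ Mk visited x ∨ x ∈ [node]) := by
      intro x hx
      have hxb := mem_rng.1 hx
      rw [hset]
      unfold Mk
      rw [pyGetD_set visited node x true true hn0 hn1 (by omega) (by omega)]
      by_cases hxn : x = node
      · simp [hxn]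
      · simp [hxn]
    have hVlen1 : (PySem.List.pySetD visited node true).length = (n + 1).toNat := by
      rw [pySetD_length]; exact hlen
    have hcount1 : (PySem.List.pySetD visited node true).count false + ([node] : List Int).length
        ≤ visited.count false := by
      rw [hset]
      simp only [List.length_singleton]
      omega
    obtain ⟨ext, V', heq, hV'len, hmk', hnd', hprops', hdone', hcount', hmarked⟩ :=
      fold_spec (g.getD node []) (fun _ h => h) [node] (PySem.List.pySetD visited node true)
        hVlen1 hmk1 (List.nodup_singleton node)
        (fun x hx => by
          rw [List.mem_singleton.1 hx]
          exact ⟨hnode, hnm, Relation.ReflTransGen.refl⟩)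
        List.mem_cons_self
        (fun x hx hxn => absurd (List.mem_singleton.1 hx) hxn)
        hcount1
    refine ⟨[node] ++ ext, V', ?_, hV'len, hmk', hnd', hprops', List.mem_append_left _ List.mem_cons_self, ?_, hcount'⟩
    · show (g.getD node []).foldl _ (temp ++ [node], PySem.List.pySetD visited node true) = _
      exact heq
    · intro x hx z hz
      by_cases hxn : x = node
      · subst hxn
        exact hmarked z hz
      · exact hdone' x hx hxn z hz

def AInv (n : Int) (pairs : List (Int × Int)) (done : List Int)
    (st : List (List Int) × List Bool) : Prop :=
  st.2.length = (n + 1).toNat ∧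
  st.1.flatten.Nodup ∧
  (∀ x ∈ st.1.flatten, x ∈ rng n) ∧
  (∀ x ∈ rng n, (x ∈ st.1.flatten ↔ (Mk st.2 x ∨ (x ∈ done ∧ (Agraph n pairs).getD x [] = [])))) ∧
  (∀ x ∈ rng n, Mk st.2 x → ∀ y ∈ rng n, connP pairs x y → Mk st.2 y) ∧
  (∀ x ∈ rng n, x ∈ done → (Agraph n pairs).getD x [] ≠ [] → Mk st.2 x) ∧
  (∀ x ∈ rng n, Mk st.2 x → (Agraph n pairs).getD x [] ≠ []) ∧
  (∀ c ∈ st.1, (∀ u ∈ c, ∀ v ∈ c, connP pairs u v) ∧ (∀ u ∈ c, ∀ v ∈ rng n, connP pairs u v → v ∈ c))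

lemma AStep_inv {n : Int} {pairs : List (Int × Int)} {done : List Int}
    {st : List (List Int) × List Bool} {v : Int}
    (hpre : ∀ pr ∈ pairs, 1 ≤ pr.1 ∧ pr.1 ≤ n ∧ 1 ≤ pr.2 ∧ pr.2 ≤ n) (hn : 0 ≤ n)
    (hv : v ∈ rng n) (hvd : v ∉ done) (hinv : AInv n pairs done st) :
    AInv n pairs (done ++ [v]) (AStep (Agraph n pairs) n st v) := by
  obtain ⟨hlen, hndf, hfr, hmem, hclos, hproc, hmkE, hcomps⟩ := hinv
  set g := Agraph n pairs with hgdef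
  unfold AStep
  by_cases c1 : 0 < (g.getD v []).length ∧ PySem.List.pyGetD st.2 v true ≠ true
  · rw [if_pos c1]
    have hc1 : g.getD v [] ≠ [] := by
      intro h
      have := c1.1
      rw [h] at this
      simp at this
    have hnMk : ¬ Mk st.2 v := c1.2
    have hfuel : st.2.count false < n.toNat + 2 := by
      have h1 : st.2.count false ≤ st.2.length := List.count_le_length
      omega
    obtain ⟨newl, V', heq, p1, p2, p3, p4, p5, p6, p7⟩ :=
      dfs_spec g (Agraph_mem n pairs) hpre hn (n.toNat + 2) st.2 v [] hfuel hlen hv hnMk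
    have hr1 : (dfsA g (n.toNat + 2) [] v st.2).1 = newl := by rw [heq]; simp
    have hr2 : (dfsA g (n.toNat + 2) [] v st.2).2 = V' := by rw [heq]
    simp only [hr1, hr2]
    -- every node connected to v ends up marked in V'
    have hclass : ∀ y, connP pairs v y → y ∈ rng n ∧ Mk V' y := by
      intro y hc
      induction hc with
      | refl => exact ⟨hv, (p2 v hv).2 (Or.inr p5)⟩
      | @tail b c hbc hadj ihc =>
        have hcr : c ∈ rng n := (adjP_rng hpre hadj).2
        obtain ⟨hbr, hbm⟩ := ihc
        refine ⟨hcr, ?_⟩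
        rcases (p2 b hbr).1 hbm with hbo | hbn
        · have := hclos b hbr hbo c hcr (Relation.ReflTransGen.single hadj)
          exact (p2 c hcr).2 (Or.inl this)
        · exact p6 b hbn c ((Agraph_mem n pairs b c).2 hadj)
    have hsup : ∀ y ∈ newl, ∀ z ∈ rng n, connP pairs y z → z ∈ newl := by
      intro y hy z hz hc
      have hvy : connP pairs v y := connP_symm (p4 y hy).2.2
      have hvz : connP pairs v z := hvy.trans hc
      have hz' : Mk V' z := (hclass z hvz).2
      rcases (p2 z hz).1 hz' with ho | hnz
      · exfalso
        have := hclos z hz ho v hv (connP_symm hvz)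
        exact hnMk this
      · exact hnz
    have hnewl_flat : ∀ x ∈ newl, x ∉ st.1.flatten := by
      intro x hx hfl
      obtain ⟨hxr, hxnm, hxc⟩ := p4 x hx
      rcases (hmem x hxr).1 hfl with hmk | ⟨_, hedge⟩
      · exact hxnm hmk
      · have hvx := edgeless_class hedge hxc
        rw [← hvx] at hedge
        exact hc1 hedge
    refine ⟨p1, ?_, ?_, ?_, ?_, ?_, ?_, ?_⟩
    · -- nodup of the new flatten
      show (st.1 ++ [newl]).flatten.Nodup
      rw [List.flatten_append]
      simp only [List.flatten_cons, List.flatten_nil, List.append_nil]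
      rw [List.nodup_append]
      exact ⟨hndf, p3, fun x hx1 z hz2 hxz => (hnewl_flat z hz2) (hxz ▸ hx1)⟩
    · intro x hx
      rw [List.flatten_append] at hx
      simp only [List.flatten_cons, List.flatten_nil, List.append_nil] at hx
      rcases List.mem_append.1 hx with h | h
      · exact hfr x h
      · exact (p4 x h).1
    · intro x hx
      rw [List.flatten_append]
      simp only [List.flatten_cons, List.flatten_nil, List.append_nil]
      rw [List.mem_append]
      constructor
      · rintro (h | h)
        · rcases (hmem x hx).1 h with hmk | ⟨hd, he⟩
          · exact Or.inl ((p2 x hx).2 (Or.inl hmk))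
          · exact Or.inr ⟨List.mem_append_left _ hd, he⟩
        · exact Or.inl ((p2 x hx).2 (Or.inr h))
      · rintro (h | ⟨hd, he⟩)
        · rcases (p2 x hx).1 h with hmk | hnl
          · exact Or.inl ((hmem x hx).2 (Or.inl hmk))
          · exact Or.inr hnl
        · rcases List.mem_append.1 hd with hd' | hd'
          · exact Or.inl ((hmem x hx).2 (Or.inr ⟨hd', he⟩))
          · exfalso
            rw [List.mem_singleton.1 hd'] at he
            exact hc1 he
    · intro x hx hmkx y hy hc
      rcases (p2 x hx).1 hmkx with ho | hnx
      · exact (p2 y hy).2 (Or.inl (hclos x hx ho y hy hc))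
      · have hvx : connP pairs v x := connP_symm (p4 x hnx).2.2
        exact (hclass y (hvx.trans hc)).2
    · intro x hx hd hne
      rcases List.mem_append.1 hd with hd' | hd'
      · exact (p2 x hx).2 (Or.inl (hproc x hx hd' hne))
      · rw [List.mem_singleton.1 hd']
        exact (p2 v hv).2 (Or.inr p5)
    · intro x hx hmkx
      rcases (p2 x hx).1 hmkx with ho | hnx
      · exact hmkE x hx ho
      · intro hedge
        have hvx := edgeless_class hedge (p4 x hnx).2.2
        rw [← hvx] at hedge
        exact hc1 hedge
    · intro c hc
      rcases List.mem_append.1 hc with hc' | hc'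
      · exact hcomps c hc'
      · rw [List.mem_singleton.1 hc']
        constructor
        · intro u hu w hw
          exact ((p4 u hu).2.2).trans (connP_symm (p4 w hw).2.2)
        · exact hsup
  · rw [if_neg c1]
    by_cases c2 : (g.getD v []).length = 0
    · rw [if_pos c2]
      have hedge : g.getD v [] = [] := List.length_eq_zero_iff.1 c2
      have hnMkv : ¬ Mk st.2 v := fun h => (hmkE v hv h) hedge
      have hvnot : v ∉ st.1.flatten := by
        intro h
        rcases (hmem v hv).1 h with h' | ⟨hd, _⟩
        · exact hnMkv h'
        · exact hvd hd
      refine ⟨hlen, ?_, ?_, ?_, hclos, ?_, hmkE, ?_⟩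
      · show (st.1 ++ [[v]]).flatten.Nodup
        rw [List.flatten_append]
        simp only [List.flatten_cons, List.flatten_nil, List.append_nil]
        rw [List.nodup_append]
        exact ⟨hndf, List.nodup_singleton v,
          fun x hx1 z hz2 hxz => hvnot ((List.mem_singleton.1 hz2) ▸ hxz ▸ hx1)⟩
      · intro x hx
        rw [List.flatten_append] at hx
        simp only [List.flatten_cons, List.flatten_nil, List.append_nil] at hx
        rcases List.mem_append.1 hx with h | h
        · exact hfr x h
        · rw [List.mem_singleton.1 h]; exact hv
      · intro x hx
        rw [List.flatten_append]
        simp only [List.flatten_cons, List.flatten_nil, List.append_nil]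
        rw [List.mem_append]
        constructor
        · rintro (h | h)
          · rcases (hmem x hx).1 h with hmk | ⟨hd, he⟩
            · exact Or.inl hmk
            · exact Or.inr ⟨List.mem_append_left _ hd, he⟩
          · rw [List.mem_singleton.1 h]
            exact Or.inr ⟨List.mem_append_right _ List.mem_cons_self, hedge⟩
        · rintro (h | ⟨hd, he⟩)
          · exact Or.inl ((hmem x hx).2 (Or.inl h))
          · rcases List.mem_append.1 hd with hd' | hd'
            · exact Or.inl ((hmem x hx).2 (Or.inr ⟨hd', he⟩))
            · exact Or.inr hd'
      · intro x hx hd hne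
        rcases List.mem_append.1 hd with hd' | hd'
        · exact hproc x hx hd' hne
        · rw [List.mem_singleton.1 hd'] at hne ⊢
          exact absurd hedge hne
      · intro c hc
        rcases List.mem_append.1 hc with hc' | hc'
        · exact hcomps c hc'
        · rw [List.mem_singleton.1 hc']
          constructor
          · intro u hu w hw
            rw [List.mem_singleton.1 hu, List.mem_singleton.1 hw]
            exact Relation.ReflTransGen.refl
          · intro u hu z _ hc''
            rw [List.mem_singleton.1 hu] at hc''
            rw [List.mem_singleton]
            exact edgeless_class hedge hc''
    · rw [if_neg c2]
      have hMkv : Mk st.2 v := by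
        by_contra hc
        exact c1 ⟨by omega, hc⟩
      refine ⟨hlen, hndf, hfr, ?_, hclos, ?_, hmkE, hcomps⟩
      · intro x hx
        rw [hmem x hx]
        constructor
        · rintro (h | ⟨hd, he⟩)
          · exact Or.inl h
          · exact Or.inr ⟨List.mem_append_left _ hd, he⟩
        · rintro (h | ⟨hd, he⟩)
          · exact Or.inl h
          · rcases List.mem_append.1 hd with hd' | hd'
            · exact Or.inr ⟨hd', he⟩
            · rw [List.mem_singleton.1 hd'] at he
              exact absurd (by rw [he]; rfl : (g.getD v []).length = 0) c2
      · intro x hx hd hne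
        rcases List.mem_append.1 hd with hd' | hd'
        · exact hproc x hx hd' hne
        · rw [List.mem_singleton.1 hd']
          exact hMkv

lemma A_fold {n : Int} {pairs : List (Int × Int)}
    (hpre : ∀ pr ∈ pairs, 1 ≤ pr.1 ∧ pr.1 ≤ n ∧ 1 ≤ pr.2 ∧ pr.2 ≤ n) (hn : 0 ≤ n) :
    ∀ (rest done : List Int) (st : List (List Int) × List Bool),
      done ++ rest = rng n → AInv n pairs done st →
      AInv n pairs (done ++ rest) (rest.foldl (AStep (Agraph n pairs) n) st) := by
  intro rest
  induction rest with
  | nil => intro done st _ h; simpa using h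
  | cons v rest ih =>
    intro done st heq h
    have hnd : (done ++ v :: rest).Nodup := heq ▸ nodup_rng n
    have hv : v ∈ rng n := by
      rw [← heq]; exact List.mem_append_right _ List.mem_cons_self
    have hvd : v ∉ done := by
      intro hc
      exact (List.disjoint_of_nodup_append hnd) hc List.mem_cons_self
    have hstep := AStep_inv hpre hn hv hvd h
    have hres := ih (done ++ [v]) _ (by rw [List.append_assoc]; simpa using heq) hstep
    simpa [List.append_assoc] using hres

lemma A_init (n : Int) (pairs : List (Int × Int)) (hn : 0 ≤ n) :
    AInv n pairs [] ([], List.replicate (n + 1).toNat false) := by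
  have hMkrep : ∀ x ∈ rng n, ¬ Mk (List.replicate (n + 1).toNat false) x := by
    intro x hx hc
    have hxb := mem_rng.1 hx
    have h1 : PySem.List.pyGetD (List.replicate (n + 1).toNat false) x true
        = (List.replicate (n + 1).toNat false)[x.toNat]'(by simp; omega) :=
      PySem.List.pyGetD_eq_getElem _ true (by omega) (by simp; omega)
    rw [List.getElem_replicate] at h1
    exact Bool.false_ne_true (h1.symm.trans hc)
  refine ⟨by simp, by simp, by simp, ?_, ?_, by simp, ?_, by simp⟩
  · intro x hx
    simp only [List.flatten_nil, List.not_mem_nil, false_iff]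
    rintro (h | ⟨h, _⟩)
    · exact hMkrep x hx h
    · exact h
  · intro x hx hmk
    exact absurd hmk (hMkrep x hx)
  · intro x hx hmk
    exact absurd hmk (hMkrep x hx)

lemma A_isCompList' {n : Int} {pairs : List (Int × Int)}
    (hpre : ∀ pr ∈ pairs, 1 ≤ pr.1 ∧ pr.1 ≤ n ∧ 1 ≤ pr.2 ∧ pr.2 ≤ n) (hn : 0 ≤ n) :
    ((rng n).foldl (AStep (Agraph n pairs) n) ([], List.replicate (n + 1).toNat false)).1.flatten.Perm (rng n) ∧
    (∀ l ∈ ((rng n).foldl (AStep (Agraph n pairs) n) ([], List.replicate (n + 1).toNat false)).1,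
      (∀ u ∈ l, ∀ v ∈ l, connP pairs u v) ∧ (∀ u ∈ l, ∀ v ∈ rng n, connP pairs u v → v ∈ l)) := by
  have hfold := A_fold hpre hn (rng n) [] ([], List.replicate (n + 1).toNat false)
    (by simp) (A_init n pairs hn)
  rw [List.nil_append] at hfold
  obtain ⟨hlen, hndf, hfr, hmem, hclos, hproc, hmkE, hcomps⟩ := hfold
  refine ⟨?_, hcomps⟩
  refine (List.perm_ext_iff_of_nodup hndf (nodup_rng n)).2 ?_
  intro x
  constructor
  · exact hfr x
  · intro hx
    by_cases hedge : (Agraph n pairs).getD x [] = []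
    · exact (hmem x hx).2 (Or.inr ⟨hx, hedge⟩)
    · exact (hmem x hx).2 (Or.inl (hproc x hx hx hedge))

lemma A_isCompList {n : Int} {pairs : List (Int × Int)}
    (hpre : ∀ pr ∈ pairs, 1 ≤ pr.1 ∧ pr.1 ≤ n ∧ 1 ≤ pr.2 ∧ pr.2 ≤ n) (hn : 0 ≤ n) :
    IsCompList n pairs (ASt n pairs).1 := by
  obtain ⟨hp, hcomps⟩ := A_isCompList' hpre hn
  exact ⟨hp, fun l hl => (hcomps l hl).1, fun l hl => (hcomps l hl).2⟩

-- ===================== side B =====================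

def BStep : (List Int × PySem.Dict Int (List Int)) → (Int × Int) →
    List Int × PySem.Dict Int (List Int) := fun st pr =>
  let la := PySem.List.pyGetD st.1 pr.1 0
  let lb := PySem.List.pyGetD st.1 pr.2 0
  if la ≠ lb then
    let kk := if (st.2.getD la []).length < (st.2.getD lb []).length then (lb, la) else (la, lb)
    let label := (st.2.getD kk.2 []).foldl (fun l v => PySem.List.pySetD l v kk.1) st.1
    let members := (st.2.insert kk.1 (st.2.getD kk.1 [] ++ st.2.getD kk.2 [])).erase kk.2
    (label, members)
  else st

def BInit (n : Int) : List Int × PySem.Dict Int (List Int) :=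
  (PySem.List.pyRange 0 (n+1) 1,
   (rng n).foldl (fun d v => d.insert v [v]) PySem.Dict.empty)

def BSt (n : Int) (pairs : List (Int × Int)) : List Int × PySem.Dict Int (List Int) :=
  pairs.foldl BStep (BInit n)

lemma max_funds_alt_eq (n : Int) (arr : List Int) (p : Int) (pairs : List (Int × Int)) :
    max_funds_alt n arr p pairs = (BSt n pairs).2.values.foldl (fun m c => max m (sumW arr c)) 0 := by
  have h : max_funds_alt n arr p pairs =
      (BSt n pairs).2.values.foldl
        (fun best comp =>
          let s := (comp.map (fun v => PySem.List.pyGetD arr (v - 1) 0)).sum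
          if best < s then s else best) 0 := rfl
  rw [h]
  have congr' : ∀ (ls : List (List Int)) (a : Int),
      ls.foldl (fun best comp =>
          let s := (comp.map (fun v => PySem.List.pyGetD arr (v - 1) 0)).sum
          if best < s then s else best) a
        = ls.foldl (fun m c => max m (sumW arr c)) a := by
    intro ls
    induction ls with
    | nil => intro a; rfl
    | cons c ls ih =>
      intro a
      simp only [List.foldl_cons, ih]
      congr 1
      show (if a < sumW arr c then sumW arr c else a) = max a (sumW arr c)
      rcases le_total a (sumW arr c) with hle | hle
      · rw [max_eq_right hle]; split_ifs <;> omega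
      · rw [max_eq_left hle]; split_ifs <;> omega
  exact congr' _ 0

def BInv (n : Int) (ps : List (Int × Int)) (st : List Int × PySem.Dict Int (List Int)) : Prop :=
  st.1.length = (n + 1).toNat ∧
  st.2.keys.Nodup ∧
  (st.2.items.map Prod.snd).flatten.Perm (rng n) ∧
  (∀ q ∈ st.2.items, ∀ u ∈ q.2, PySem.List.pyGetD st.1 u 0 = q.1) ∧
  (∀ q ∈ st.2.items, ∀ u ∈ q.2, ∀ v ∈ q.2, connP ps u v) ∧
  (∀ pr ∈ ps, PySem.List.pyGetD st.1 pr.1 0 = PySem.List.pyGetD st.1 pr.2 0)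

lemma nodup_keys_erase {κ ν : Type} [BEq κ] (d : PySem.Dict κ ν) (h : d.keys.Nodup) (k : κ) :
    (d.erase k).keys.Nodup := by
  have he : (d.erase k).items = d.items.filter (fun q => !(q.1 == k)) := rfl
  show ((d.erase k).items.map Prod.fst).Nodup
  rw [he]
  exact (List.filter_sublist.map Prod.fst).nodup h

lemma map_fst_replace (its : List (Int × List Int)) (la : Int) (KL : List Int) :
    ((its.map (fun q => if q.1 == la then (la, KL) else q)).map Prod.fst) = its.map Prod.fst := by
  rw [List.map_map]
  refine List.map_congr_left ?_
  intro q hq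
  by_cases h : q.1 = la <;> simp [h]

lemma filter_out_perm : ∀ (its : List (Int × List Int)), (its.map Prod.fst).Nodup →
    ∀ {lb : Int} {L : List Int}, (lb, L) ∈ its →
    (L ++ ((its.filter (fun q => !(q.1 == lb))).map Prod.snd).flatten).Perm
      ((its.map Prod.snd).flatten) := by
  intro its
  induction its with
  | nil => intro _ lb L h; simp at h
  | cons hd tl ih =>
    intro hnd lb L hmem
    obtain ⟨k, l⟩ := hd
    rw [List.map_cons] at hnd
    have hnd1 : k ∉ tl.map Prod.fst := (List.nodup_cons.1 hnd).1
    have hnd2 : (tl.map Prod.fst).Nodup := (List.nodup_cons.1 hnd).2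
    rcases List.mem_cons.1 hmem with heq | htl
    · have hk : lb = k := (Prod.ext_iff.1 heq.symm).1.symm
      have hL : L = l := (Prod.ext_iff.1 heq).2
      subst hk; subst hL
      have hfl : tl.filter (fun q => !(q.1 == lb)) = tl := by
        refine List.filter_eq_self.2 ?_
        intro q hq
        have : q.1 ≠ lb := fun h => hnd1 (h ▸ List.mem_map.2 ⟨q, hq, rfl⟩)
        simpa using this
      simp only [List.filter_cons, beq_self_eq_true, Bool.not_true, List.map_cons,
        List.flatten_cons, hfl]
      simp
    · have hk : k ≠ lb := by
        intro h
        exact hnd1 (h ▸ List.mem_map.2 ⟨(lb, L), htl, rfl⟩)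
      have hkeeps : (!(k == lb)) = true := by simpa using hk
      simp only [List.filter_cons, hkeeps, List.map_cons, List.flatten_cons]
      exact (List.perm_append_comm_assoc L l _).trans ((ih hnd2 htl).append_left l)

lemma replace_add_perm (L : List Int) : ∀ (its : List (Int × List Int)), (its.map Prod.fst).Nodup →
    ∀ {la : Int} {K : List Int}, (la, K) ∈ its →
    (((its.map (fun q => if q.1 == la then (la, K ++ L) else q)).map Prod.snd).flatten).Perm
      (L ++ (its.map Prod.snd).flatten) := by
  intro its
  induction its with
  | nil => intro _ la K h; simp at h
  | cons hd tl ih =>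
    intro hnd la K hmem
    obtain ⟨k, l⟩ := hd
    rw [List.map_cons] at hnd
    have hnd1 : k ∉ tl.map Prod.fst := (List.nodup_cons.1 hnd).1
    have hnd2 : (tl.map Prod.fst).Nodup := (List.nodup_cons.1 hnd).2
    rcases List.mem_cons.1 hmem with heq | htl
    · have hk : la = k := (Prod.ext_iff.1 heq.symm).1.symm
      have hK : K = l := (Prod.ext_iff.1 heq).2
      subst hk; subst hK
      have hmap : tl.map (fun q => if q.1 == la then (la, K ++ L) else q) = tl := by
        refine List.map_congr_left ?_ |>.trans (List.map_id _)
        intro q hq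
        have : q.1 ≠ la := fun h => hnd1 (h ▸ List.mem_map.2 ⟨q, hq, rfl⟩)
        simp [this]
      simp only [List.map_cons, beq_self_eq_true, if_pos, List.flatten_cons, hmap]
      rw [List.append_assoc]
      exact List.perm_append_comm_assoc K L _
    · have hk : k ≠ la := fun h => hnd1 (h ▸ List.mem_map.2 ⟨(la, K), htl, rfl⟩)
      have hkeq : (k == la) = false := by simpa using hk
      simp only [List.map_cons, hkeq, Bool.false_eq_true, if_false, List.flatten_cons]
      exact ((ih hnd2 htl).append_left l).trans (List.perm_append_comm_assoc l L _)

lemma mem_items_merge (d : PySem.Dict Int (List Int)) (hnd : d.keys.Nodup)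
    {la lb : Int} {K : List Int} (hla : (la, K) ∈ d.items) (hne : la ≠ lb) (KL : List Int)
    (q : Int × List Int) :
    q ∈ ((d.insert la KL).erase lb).items ↔
      (q = (la, KL) ∨ (q ∈ d.items ∧ q.1 ≠ la ∧ q.1 ≠ lb)) := by
  have hcont : d.contains la = true :=
    (PySem.Dict.contains_iff_mem_keys d la).2 (by
      show la ∈ d.items.map Prod.fst
      exact List.mem_map.2 ⟨(la, K), hla, rfl⟩)
  have he : ((d.insert la KL).erase lb).items
      = ((d.items.map (fun p => if p.1 == la then (la, KL) else p)).filter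
          (fun q => !(q.1 == lb))) := by
    have h1 : ((d.insert la KL).erase lb).items
        = (d.insert la KL).items.filter (fun q => !(q.1 == lb)) := rfl
    rw [h1, PySem.Dict.items_insert_of_contains d KL hcont]
  rw [he, List.mem_filter, List.mem_map]
  constructor
  · rintro ⟨⟨q', hq', hfq⟩, hflt⟩
    by_cases h : q'.1 = la
    · left
      rw [← hfq]
      simp [h]
    · right
      have : q = q' := by rw [← hfq]; simp [h]
      subst this
      refine ⟨hq', fun hh => h hh, ?_⟩
      intro hh
      rw [hh] at hflt
      simp at hflt
  · rintro (rfl | ⟨hq, hqa, hqb⟩)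
    · exact ⟨⟨(la, K), hla, by simp⟩, by simpa using hne⟩
    · exact ⟨⟨q, hq, by simp [hqa]⟩, by simpa using hqb⟩

lemma foldSet_spec (c : Int) : ∀ (L : List Int) (label : List Int),
    (∀ v ∈ L, 0 ≤ v ∧ v < label.length) →
    ((L.foldl (fun l v => PySem.List.pySetD l v c) label).length = label.length ∧
     ∀ x, 0 ≤ x → (x : Int) < label.length →
       PySem.List.pyGetD (L.foldl (fun l v => PySem.List.pySetD l v c) label) x 0
         = if x ∈ L then c else PySem.List.pyGetD label x 0) := by
  intro L
  induction L with
  | nil => intro label _; exact ⟨rfl, fun x _ _ => by simp⟩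
  | cons v L ih =>
    intro label hb
    have hv := hb v List.mem_cons_self
    have hset : PySem.List.pySetD label v c = label.set v.toNat c :=
      pySetD_eq_set label v c hv.1 hv.2
    have hlen : (PySem.List.pySetD label v c).length = label.length := pySetD_length label v c
    obtain ⟨ihlen, ihget⟩ := ih (PySem.List.pySetD label v c)
      (fun u hu => by rw [hlen]; exact hb u (List.mem_cons_of_mem _ hu))
    constructor
    · simpa [List.foldl_cons, hlen] using ihlen
    · intro x hx0 hx1
      rw [List.foldl_cons]
      rw [ihget x hx0 (by rw [hlen]; exact hx1)]
      rw [hset, pyGetD_set label v x c 0 hv.1 hv.2 hx0 hx1]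
      by_cases hxL : x ∈ L <;> by_cases hxv : x = v <;>
        simp [hxL, hxv, List.mem_cons]

lemma BInit_items (n : Int) : (BInit n).2.items = (rng n).map (fun v => (v, [v])) := by
  have h := PySem.Dict.items_foldl_insert_fresh (rng n) (fun v => v) (fun v => [v])
    PySem.Dict.empty (fun a _ => by simp) (by simpa using nodup_rng n)
  simpa using h

lemma pyGetD_rng0 {n v : Int} (hn : 0 ≤ n) (h1 : 1 ≤ v) (h2 : v < n + 1) :
    PySem.List.pyGetD (PySem.List.pyRange 0 (n+1) 1) v 0 = v := by
  rw [← List.map_id (PySem.List.pyRange 0 (n+1) 1)]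
  rw [PySem.List.pyGetD_map_pyRange_of_nonneg id (n+1) v 0 (by omega) (by omega)]
  rfl

lemma length_pyRange0 (n : Int) (hn : 0 ≤ n) :
    (PySem.List.pyRange 0 (n+1) 1).length = (n+1).toNat := by
  rw [PySem.List.pyRange_of_pos 0 (n+1) (by norm_num)]
  simp only [List.length_map, List.length_range]
  split_ifs with h
  · congr 1; omega
  · omega

lemma flatten_singletons (l : List Int) : (l.map (fun v => [v])).flatten = l := by
  induction l with
  | nil => rfl
  | cons x l ih => simp [ih]

lemma BInv_init (n : Int) (hn : 0 ≤ n) : BInv n [] (BInit n) := by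
  have hitems := BInit_items n
  refine ⟨length_pyRange0 n hn, ?_, ?_, ?_, ?_, by simp⟩
  · show ((BInit n).2.items.map Prod.fst).Nodup
    rw [hitems, List.map_map]
    have he : (Prod.fst ∘ fun v : Int => (v, [v])) = id := rfl
    rw [he, List.map_id]
    exact nodup_rng n
  · rw [hitems, List.map_map]
    have he : (Prod.snd ∘ fun v : Int => (v, [v])) = (fun v : Int => [v]) := rfl
    rw [he, flatten_singletons]
  · intro q hq u hu
    rw [hitems] at hq
    obtain ⟨v, hv, rfl⟩ := List.mem_map.1 hq
    simp only [List.mem_singleton] at hu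
    subst hu
    have := mem_rng.1 hv
    exact pyGetD_rng0 hn this.1 this.2
  · intro q hq u hu v hv
    rw [hitems] at hq
    obtain ⟨w, hw, rfl⟩ := List.mem_map.1 hq
    simp only [List.mem_singleton] at hu hv
    subst hu; subst hv
    exact Relation.ReflTransGen.refl

lemma BStep_inv {n : Int} {ps : List (Int × Int)} {st : List Int × PySem.Dict Int (List Int)}
    {pr : Int × Int} (hn : 0 ≤ n)
    (ha : pr.1 ∈ rng n) (hb : pr.2 ∈ rng n)
    (hps : ∀ p' ∈ ps, p'.1 ∈ rng n ∧ p'.2 ∈ rng n) (hinv : BInv n ps st) :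
    BInv n (ps ++ [pr]) (BStep st pr) := by
  obtain ⟨hlen, hnd, hperm, hlab, hconn, hpair⟩ := hinv
  -- coverage of the two endpoints
  have hcov : ∀ z : Int, z ∈ rng n → ∃ q ∈ st.2.items, z ∈ q.2 := by
    intro z hz
    have : z ∈ (st.2.items.map Prod.snd).flatten := hperm.mem_iff.2 hz
    obtain ⟨l, hl, hzl⟩ := List.mem_flatten.1 this
    obtain ⟨q, hq, rfl⟩ := List.mem_map.1 hl
    exact ⟨q, hq, hzl⟩
  have hitem_getD : ∀ q ∈ st.2.items, st.2.getD q.1 [] = q.2 := by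
    intro q hq
    exact PySem.Dict.getD_of_mem_items st.2 (by exact hq) hnd []
  -- all members lie in rng n
  have hmemrng : ∀ q ∈ st.2.items, ∀ u ∈ q.2, u ∈ rng n := by
    intro q hq u hu
    exact hperm.mem_iff.1 (List.mem_flatten.2 ⟨q.2, List.mem_map.2 ⟨q, hq, rfl⟩, hu⟩)
  obtain ⟨qa, hqa, hqa2⟩ := hcov pr.1 ha
  obtain ⟨qb, hqb, hqb2⟩ := hcov pr.2 hb
  have hla : PySem.List.pyGetD st.1 pr.1 0 = qa.1 := hlab qa hqa pr.1 hqa2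
  have hlb : PySem.List.pyGetD st.1 pr.2 0 = qb.1 := hlab qb hqb pr.2 hqb2
  show BInv n (ps ++ [pr]) (BStep st pr)
  unfold BStep
  by_cases hne : PySem.List.pyGetD st.1 pr.1 0 ≠ PySem.List.pyGetD st.1 pr.2 0
  · -- the merge case
    have hmain : ∀ k1 k2, k1 ≠ k2 →
        (k1, st.2.getD k1 []) ∈ st.2.items → (k2, st.2.getD k2 []) ∈ st.2.items →
        ∀ x0 ∈ st.2.getD k1 [], ∀ y0 ∈ st.2.getD k2 [], adjP (ps ++ [pr]) x0 y0 →
        (PySem.List.pyGetD st.1 pr.1 0 = k1 ∨ PySem.List.pyGetD st.1 pr.1 0 = k2) →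
        (PySem.List.pyGetD st.1 pr.2 0 = k1 ∨ PySem.List.pyGetD st.1 pr.2 0 = k2) →
        BInv n (ps ++ [pr])
          ((st.2.getD k2 []).foldl (fun l v => PySem.List.pySetD l v k1) st.1,
           (st.2.insert k1 (st.2.getD k1 [] ++ st.2.getD k2 [])).erase k2) := by
      intro k1 k2 hk12 hK hL x0 hx0 y0 hy0 hadj hpa hpb
      set K := st.2.getD k1 [] with hKdef
      set L := st.2.getD k2 [] with hLdef
      have hKrng : ∀ u ∈ K, u ∈ rng n := fun u hu => hmemrng _ hK u hu
      have hLrng : ∀ u ∈ L, u ∈ rng n := fun u hu => hmemrng _ hL u hu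
      have hlenZ : (st.1.length : Int) = n + 1 := by rw [hlen]; omega
      have hbounds : ∀ v ∈ L, 0 ≤ v ∧ (v : Int) < st.1.length := by
        intro v hv
        have := mem_rng.1 (hLrng v hv)
        omega
      obtain ⟨hlen', hget'⟩ := foldSet_spec k1 L st.1 hbounds
      have hlabK : ∀ u ∈ K, PySem.List.pyGetD st.1 u 0 = k1 := fun u hu => hlab _ hK u hu
      have hlabL : ∀ u ∈ L, PySem.List.pyGetD st.1 u 0 = k2 := fun u hu => hlab _ hL u hu
      have hdisj : ∀ u, u ∈ K → u ∈ L → False := by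
        intro u hu1 hu2
        exact hk12 ((hlabK u hu1).symm.trans (hlabL u hu2))
      have hinL : ∀ z ∈ rng n, (z ∈ L ↔ PySem.List.pyGetD st.1 z 0 = k2) := by
        intro z hz
        constructor
        · exact hlabL z
        · intro hzl
          obtain ⟨qz, hqz, hz2⟩ := hcov z hz
          have h1 : PySem.List.pyGetD st.1 z 0 = qz.1 := hlab qz hqz z hz2
          have h2 : qz.1 = k2 := by rw [← h1, hzl]
          have h3 : st.2.getD qz.1 [] = qz.2 := hitem_getD qz hqz
          have : L = qz.2 := by rw [hLdef, ← h2, h3]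
          rw [this]; exact hz2
      have hrelabel : ∀ z ∈ rng n,
          PySem.List.pyGetD ((L.foldl (fun l v => PySem.List.pySetD l v k1) st.1)) z 0
            = if PySem.List.pyGetD st.1 z 0 = k2 then k1 else PySem.List.pyGetD st.1 z 0 := by
        intro z hz
        have hzb := mem_rng.1 hz
        rw [hget' z (by omega) (by omega)]
        by_cases hzl : z ∈ L
        · rw [if_pos hzl, if_pos ((hinL z hz).1 hzl)]
        · rw [if_neg hzl, if_neg (fun hc => hzl ((hinL z hz).2 hc))]
      -- items of the merged dict
      have hmm := mem_items_merge st.2 hnd hK hk12 (K ++ L)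
      have hmapfst : ((st.2.items.map (fun p => if p.1 == k1 then (k1, K ++ L) else p)).map Prod.fst)
          = st.2.items.map Prod.fst := map_fst_replace _ _ _
      have hitems_eq : ((st.2.insert k1 (K ++ L)).erase k2).items
          = ((st.2.items.map (fun p => if p.1 == k1 then (k1, K ++ L) else p)).filter
              (fun q => !(q.1 == k2))) := by
        have hcont : st.2.contains k1 = true :=
          (PySem.Dict.contains_iff_mem_keys st.2 k1).2
            (List.mem_map.2 ⟨(k1, K), hK, rfl⟩)
        have h1 : ((st.2.insert k1 (K ++ L)).erase k2).items
            = (st.2.insert k1 (K ++ L)).items.filter (fun q => !(q.1 == k2)) := rfl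
        rw [h1, PySem.Dict.items_insert_of_contains st.2 (K ++ L) hcont]
      refine ⟨by rw [hlen']; exact hlen, ?_, ?_, ?_, ?_, ?_⟩
      · exact nodup_keys_erase _ (PySem.Dict.nodup_keys_insert st.2 k1 (K ++ L) hnd) k2
      · -- flatten perm
        show ((((st.2.insert k1 (K ++ L)).erase k2).items).map Prod.snd).flatten.Perm (rng n)
        rw [hitems_eq]
        have hLmem : (k2, L) ∈ st.2.items.map (fun p => if p.1 == k1 then (k1, K ++ L) else p) := by
          refine List.mem_map.2 ⟨(k2, L), hL, ?_⟩
          have hbeq : (k2 == k1) = false := by simpa using (fun h : k2 = k1 => hk12 h.symm)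
          simp [hbeq]
        have hfnd : ((st.2.items.map (fun p => if p.1 == k1 then (k1, K ++ L) else p)).map Prod.fst).Nodup := by
          rw [hmapfst]; exact hnd
        have h1 := filter_out_perm _ hfnd hLmem
        have h2 := replace_add_perm L st.2.items hnd hK
        have h3 : (L ++ (((st.2.items.map (fun p => if p.1 == k1 then (k1, K ++ L) else p)).filter
            (fun q => !(q.1 == k2))).map Prod.snd).flatten).Perm (L ++ (st.2.items.map Prod.snd).flatten) :=
          h1.trans h2
        exact ((List.perm_append_left_iff L).1 h3).trans hperm
      · -- labels
        intro q hq u hu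
        rcases (hmm q).1 hq with rfl | ⟨hq', hqa', hqb'⟩
        · rcases List.mem_append.1 hu with huK | huL
          · have : u ∉ L := fun hc => hdisj u huK hc
            rw [hrelabel u (hKrng u huK)]
            rw [if_neg (fun hc => this ((hinL u (hKrng u huK)).2 hc))]
            exact hlabK u huK
          · rw [hrelabel u (hLrng u huL), if_pos (hlabL u huL)]
        · have hurng : u ∈ rng n := hmemrng q hq' u hu
          have h1 : PySem.List.pyGetD st.1 u 0 = q.1 := hlab q hq' u hu
          rw [hrelabel u hurng, h1, if_neg hqb']
      · -- connectivity inside each class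
        intro q hq u hu v hv
        rcases (hmm q).1 hq with rfl | ⟨hq', _, _⟩
        · have hxy : connP (ps ++ [pr]) x0 y0 := Relation.ReflTransGen.single hadj
          have hcK : ∀ w ∈ K, connP (ps ++ [pr]) w x0 :=
            fun w hw => connP_mono [pr] (hconn _ hK w hw x0 hx0)
          have hcL : ∀ w ∈ L, connP (ps ++ [pr]) y0 w :=
            fun w hw => connP_mono [pr] (hconn _ hL y0 hy0 w hw)
          have cross : ∀ w ∈ K, ∀ w' ∈ L, connP (ps ++ [pr]) w w' :=
            fun w hw w' hw' => ((hcK w hw).trans hxy).trans (hcL w' hw')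
          rcases List.mem_append.1 hu with hu' | hu' <;> rcases List.mem_append.1 hv with hv' | hv'
          · exact connP_mono [pr] (hconn _ hK u hu' v hv')
          · exact cross u hu' v hv'
          · exact connP_symm (cross v hv' u hu')
          · exact connP_mono [pr] (hconn _ hL u hu' v hv')
        · exact connP_mono [pr] (hconn q hq' u hu v hv)
      · -- every processed pair has equal labels
        intro pr' hpr'
        rcases List.mem_append.1 hpr' with h | h
        · obtain ⟨h1r, h2r⟩ := hps pr' h
          have hc := hpair pr' h
          rw [hrelabel _ h1r, hrelabel _ h2r, hc]
        · rw [List.mem_singleton.1 h]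
          rw [hrelabel _ ha, hrelabel _ hb]
          rcases hpa with h1 | h1 <;> rcases hpb with h2 | h2 <;> rw [h1, h2] <;>
            simp [hk12, fun h : k2 = k1 => hk12 h.symm]
    -- dispatch the two orientations of kk
    have hne' : qa.1 ≠ qb.1 := by rw [← hla, ← hlb]; exact hne
    have hKa : (qa.1, st.2.getD qa.1 []) ∈ st.2.items := by
      have := hitem_getD qa hqa
      rw [this]
      exact hqa
    have hKb : (qb.1, st.2.getD qb.1 []) ∈ st.2.items := by
      have := hitem_getD qb hqb
      rw [this]
      exact hqb
    have hmema : pr.1 ∈ st.2.getD qa.1 [] := by rw [hitem_getD qa hqa]; exact hqa2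
    have hmemb : pr.2 ∈ st.2.getD qb.1 [] := by rw [hitem_getD qb hqb]; exact hqb2
    have hprm : pr ∈ ps ++ [pr] := List.mem_append_right _ List.mem_cons_self
    simp only [hne, if_pos, if_true, hla, hlb]
    split_ifs with hswap
    · exact hmain qb.1 qa.1 (Ne.symm hne') hKb hKa pr.2 hmemb pr.1 hmema
        (Or.inr (by rw [show (pr.1, pr.2) = pr from rfl]; exact hprm))
        (by rw [hla]; exact Or.inr rfl) (by rw [hlb]; exact Or.inl rfl)
    · exact hmain qa.1 qb.1 hne' hKa hKb pr.1 hmema pr.2 hmemb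
        (Or.inl (by rw [show (pr.1, pr.2) = pr from rfl]; exact hprm))
        (by rw [hla]; exact Or.inl rfl) (by rw [hlb]; exact Or.inr rfl)
  · simp only [hne, if_neg, if_false]
    push_neg at hne
    refine ⟨hlen, hnd, hperm, hlab, ?_, ?_⟩
    · intro q hq u hu v hv
      exact connP_mono [pr] (hconn q hq u hu v hv)
    · intro pr' hpr'
      rcases List.mem_append.1 hpr' with h | h
      · exact hpair pr' h
      · rw [List.mem_singleton.1 h]
        exact hne

lemma BInv_fold {n : Int} (hn : 0 ≤ n) :
    ∀ (rest done : List (Int × Int)) (st : List Int × PySem.Dict Int (List Int)),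
    (∀ p' ∈ done ++ rest, p'.1 ∈ rng n ∧ p'.2 ∈ rng n) →
    BInv n done st → BInv n (done ++ rest) (rest.foldl BStep st) := by
  intro rest
  induction rest with
  | nil => intro done st _ h; simpa using h
  | cons pr rest ih =>
    intro done st hpre h
    have hpr : pr.1 ∈ rng n ∧ pr.2 ∈ rng n :=
      hpre pr (List.mem_append_right _ List.mem_cons_self)
    have hps : ∀ p' ∈ done, p'.1 ∈ rng n ∧ p'.2 ∈ rng n :=
      fun p' hp' => hpre p' (List.mem_append_left _ hp')
    have hstep := BStep_inv hn hpr.1 hpr.2 hps h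
    have hpre' : ∀ p' ∈ (done ++ [pr]) ++ rest, p'.1 ∈ rng n ∧ p'.2 ∈ rng n := by
      intro p' hp'
      refine hpre p' ?_
      rcases List.mem_append.1 hp' with h' | h'
      · rcases List.mem_append.1 h' with h'' | h''
        · exact List.mem_append_left _ h''
        · exact List.mem_append_right _ (by
            rw [List.mem_singleton.1 h'']; exact List.mem_cons_self)
      · exact List.mem_append_right _ (List.mem_cons_of_mem _ h')
    have := ih (done ++ [pr]) (BStep st pr) hpre' hstep
    simpa [List.append_assoc] using this

lemma B_isCompList {n : Int} {pairs : List (Int × Int)}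
    (hpre : ∀ pr ∈ pairs, 1 ≤ pr.1 ∧ pr.1 ≤ n ∧ 1 ≤ pr.2 ∧ pr.2 ≤ n) (hn : 0 ≤ n) :
    IsCompList n pairs (BSt n pairs).2.values := by
  have hpre' : ∀ p' ∈ ([] : List (Int × Int)) ++ pairs, p'.1 ∈ rng n ∧ p'.2 ∈ rng n := by
    intro p' hp'
    have := hpre p' (by simpa using hp')
    constructor <;> rw [mem_rng] <;> omega
  have hinv : BInv n pairs (BSt n pairs) := by
    have := BInv_fold hn pairs [] (BInit n) hpre' (BInv_init n hn)
    simpa using this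
  obtain ⟨hlen, hnd, hperm, hlab, hconn, hpair⟩ := hinv
  have hvals : (BSt n pairs).2.values = (BSt n pairs).2.items.map Prod.snd := rfl
  have hitem_getD : ∀ q ∈ (BSt n pairs).2.items, (BSt n pairs).2.getD q.1 [] = q.2 :=
    fun q hq => PySem.Dict.getD_of_mem_items (BSt n pairs).2 (by exact hq) hnd []
  refine ⟨by rw [hvals]; exact hperm, ?_, ?_⟩
  · intro l hl u hu v hv
    obtain ⟨q, hq, rfl⟩ := List.mem_map.1 (by rw [hvals] at hl; exact hl)
    exact hconn q hq u hu v hv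
  · intro l hl u hu v hvr hconnuv
    obtain ⟨q, hq, rfl⟩ := List.mem_map.1 (by rw [hvals] at hl; exact hl)
    have h1 : PySem.List.pyGetD (BSt n pairs).1 u 0 = q.1 := hlab q hq u hu
    have h2 : PySem.List.pyGetD (BSt n pairs).1 v 0 = PySem.List.pyGetD (BSt n pairs).1 u 0 :=
      (connP_label (fun z => PySem.List.pyGetD (BSt n pairs).1 z 0) hpair hconnuv).symm
    have : v ∈ ((BSt n pairs).2.items.map Prod.snd).flatten := hperm.mem_iff.2 hvr
    obtain ⟨l', hl', hvl'⟩ := List.mem_flatten.1 this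
    obtain ⟨qv, hqv, rfl⟩ := List.mem_map.1 hl'
    have h3 : PySem.List.pyGetD (BSt n pairs).1 v 0 = qv.1 := hlab qv hqv v hvl'
    have h4 : qv.1 = q.1 := by rw [← h3, h2, h1]
    have h5 : (BSt n pairs).2.getD qv.1 [] = qv.2 := hitem_getD qv hqv
    have h6 : (BSt n pairs).2.getD q.1 [] = q.2 := hitem_getD q hq
    have : qv.2 = q.2 := by rw [← h5, ← h6, h4]
    rw [← this]
    exact hvl'

-- ===== VERDICT (by name: the statement is the Claim_ definition above) =====
theorem max_funds_spec : Claim_equal_max_funds := by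
  intro n arr p pairs _hdom hpre
  obtain ⟨_harr, hprs⟩ := hpre
  unfold Spec_max_funds
  by_cases hn : 0 ≤ n
  · rw [max_funds_eq, max_funds_alt_eq]
    exact isCompList_fold_eq arr (A_isCompList hprs hn) (B_isCompList hprs hn)
  · have hpairs : pairs = [] := by
      cases pairs with
      | nil => rfl
      | cons pr ps => exact absurd (hprs pr List.mem_cons_self) (by omega)
    subst hpairs
    have hrng : rng n = [] := by
      unfold rng
      rw [PySem.List.pyRange_of_pos 1 (n+1) (by norm_num), if_neg (by omega)]
      simp
    rw [max_funds_eq, max_funds_alt_eq]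
    have h1 : (ASt n []).1 = [] := by
      unfold ASt
      rw [hrng]
      rfl
    have h2 : (BSt n []).2.values = [] := by
      unfold BSt BInit
      simp only [List.foldl_nil]
      rw [hrng]
      rfl
    rw [h1, h2]
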